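-- pv_equiv track=rewrite | github.com/jjsandhu155/AI | U3_Turns/Ghost/ghost.py | min_move
-- ===== SOURCE A (Python) =====
-- alphabet = 'abcdefghijklmnopqrstuvwxyz'
--
-- def game_is_over(word, dictionary):
--     if word in dictionary:
--         return True
--     return False
--
-- def switch_player(player):
--     if player == '1':
--         return '2'
--     if player == '2':
--         return '1'
--
-- def score_board(word, player, dictionary):
--     if word in dictionary:
--         if player == '1':
--             return -1
--         if player == '2':
--             return 1
--     return 0
--
-- def next_possible_boards(word, dictionary):
--     possible_boards = []
--     for letter in alphabet:
--         temp = word + letter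
--         for d in dictionary:
--             if d.startswith(temp):
--                 possible_boards.append((temp, letter))
--                 break
--     return possible_boards, {d for d in dictionary if d.startswith(word)}
--
-- def min_step(board, dictionary, player):
--     if game_is_over(board, dictionary):
--         return score_board(board, player, dictionary)
--     results = []
--     moves, new_dictionary = next_possible_boards(board, dictionary)
--     if len(moves) == 0:
--         results.append(max_step(board, new_dictionary, switch_player(player)))
--     else:
--         for next_board in moves:
--             results.append(max_step(next_board[0], new_dictionary, switch_player(player)))
--     return min(results)
--
-- def max_step(board, dictionary, player):
--     if game_is_over(board, dictionary):
--         return score_board(board, player, dictionary)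
--     results = []
--     moves, new_dictionary = next_possible_boards(board, dictionary)
--     if len(moves) == 0:
--         results.append(min_step(board, new_dictionary, switch_player(player)))
--     else:
--         for next_board in moves:
--             results.append(min_step(next_board[0], new_dictionary, switch_player(player)))
--     return max(results)
--
-- def min_move(board, dictionary, player):
--     if game_is_over(board, dictionary):
--         return score_board(board, player, dictionary)
--     results = []
--     moves, new_dictionary = next_possible_boards(board, dictionary)
--     for next_board in moves:
--         results.append((max_step(next_board[0], new_dictionary, switch_player(player)), next_board[1]))
--     return [move for value, move in results if value == -1]
-- ===== SOURCE B (Python) =====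
-- # Trie-style minimax: partition the suffix set by next letter at each node
-- # instead of rescanning the whole dictionary with startswith for all 26 letters.
--
-- def _next(player):
--     if player == '1':
--         return '2'
--     if player == '2':
--         return '1'
--     return None
--
-- def _score(player):
--     if player == '1':
--         return -1
--     if player == '2':
--         return 1
--     return 0
--
-- def _value(suffixes, player, maximize):
--     # suffixes: non-empty list of remaining word suffixes at this node
--     if '' in suffixes:
--         return _score(player)
--     firsts = sorted({s[0] for s in suffixes if s})
--     vals = [_value([s[1:] for s in suffixes if s and s[0] == c], _next(player), not maximize)
--             for c in firsts]
--     return max(vals) if maximize else min(vals)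
--
-- def min_move(board, dictionary, player):
--     suffixes = [w[len(board):] for w in dictionary if w.startswith(board)]
--     if '' in suffixes:
--         return []
--     firsts = sorted({s[0] for s in suffixes if s})
--     return [c for c in firsts
--             if _value([s[1:] for s in suffixes if s and s[0] == c], _next(player), True) == -1]
-- ===== Notes on version B (the rewrite author's own statement) =====
-- stated objective: faster
-- what changed: B partitions the set of matching word suffixes by their next letter (a top-down trie walk) and runs the minimax over these partitions, instead of A's per-node scan of all 26 letters against the whole dictionary with startswith and repeated set rebuilding.
-- outside the precondition, e.g. on min_move('a', {'a'}, '1'): A returns -1, B returns []; on min_move('', {'a!b'}, '1'): A raises RecursionError, B returns []; on min_move('', {'A'}, '2'): A returns [], B returns ['A']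
import Mathlib
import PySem

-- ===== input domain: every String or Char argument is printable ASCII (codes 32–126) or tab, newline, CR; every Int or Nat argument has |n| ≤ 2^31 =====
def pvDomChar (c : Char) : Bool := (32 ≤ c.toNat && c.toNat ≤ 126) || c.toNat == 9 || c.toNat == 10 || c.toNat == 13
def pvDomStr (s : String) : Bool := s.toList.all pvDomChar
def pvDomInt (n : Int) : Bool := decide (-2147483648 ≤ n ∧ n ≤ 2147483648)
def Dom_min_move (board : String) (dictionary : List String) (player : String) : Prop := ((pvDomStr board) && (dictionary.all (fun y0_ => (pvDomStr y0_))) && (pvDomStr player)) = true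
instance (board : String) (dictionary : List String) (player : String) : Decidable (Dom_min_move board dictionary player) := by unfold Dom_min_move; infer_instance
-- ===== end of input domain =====

-- B replaces A's per-node scan of 26 letters × whole dictionary (with startswith and set
-- rebuilding) by one trie-style partition of the matching word suffixes per node; return
-- value only — neither version mutates its arguments.

-- ===== PORT A =====
-- Strings are handled through their character lists (PySem.Chars primitives).  The mutual
-- min_step/max_step recursion carries a fuel argument only to make it total in Lean; the
-- fuel passed in min_move exceeds the recursion depth on every input Pre_ admits.
def pvAlphabet : List Char := "abcdefghijklmnopqrstuvwxyz".toList

def pvGameIsOver (word : List Char) (dict : List (List Char)) : Bool :=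
  word ∈ dict

def pvSwitchPlayer (player : Option String) : Option String :=
  if player = some "1" then some "2"
  else if player = some "2" then some "1"
  else none

def pvScoreBoard (word : List Char) (player : Option String) (dict : List (List Char)) : Int :=
  if word ∈ dict then
    if player = some "1" then -1
    else if player = some "2" then 1
    else 0
  else 0

def pvNextPossibleBoards (word : List Char) (dict : List (List Char)) :
    List (List Char × Char) × List (List Char) :=
  (pvAlphabet.filterMap (fun letter =>
      if dict.any (fun d => PySem.Chars.startswith d (word ++ [letter]))
      then some (word ++ [letter], letter) else none),
   PySem.Set.ofList (dict.filter (fun d => PySem.Chars.startswith d word)))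

mutual
def pvMinStep : Nat → List Char → List (List Char) → Option String → Int
  | 0, _, _, _ => 0
  | fuel + 1, board, dict, player =>
    if pvGameIsOver board dict then pvScoreBoard board player dict
    else
      let mv := pvNextPossibleBoards board dict
      let results :=
        if mv.1 = [] then [pvMaxStep fuel board mv.2 (pvSwitchPlayer player)]
        else mv.1.map (fun nb => pvMaxStep fuel nb.1 mv.2 (pvSwitchPlayer player))
      (PySem.List.min? results (fun v => v)).getD 0

def pvMaxStep : Nat → List Char → List (List Char) → Option String → Int
  | 0, _, _, _ => 0
  | fuel + 1, board, dict, player =>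
    if pvGameIsOver board dict then pvScoreBoard board player dict
    else
      let mv := pvNextPossibleBoards board dict
      let results :=
        if mv.1 = [] then [pvMinStep fuel board mv.2 (pvSwitchPlayer player)]
        else mv.1.map (fun nb => pvMinStep fuel nb.1 mv.2 (pvSwitchPlayer player))
      (PySem.List.max? results (fun v => v)).getD 0
end

def min_move (board : String) (dictionary : List String) (player : String) : List String :=
  let b := board.toList
  let dict := dictionary.map String.toList
  if pvGameIsOver b dict then []   -- Python returns an int score here, not a list; outside Pre_
  else
    let mv := pvNextPossibleBoards b dict
    let fuel := dict.foldl (fun a w => a + w.length) 0 + 2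
    let results := mv.1.map (fun nb => (pvMaxStep fuel nb.1 mv.2 (pvSwitchPlayer (some player)), nb.2))
    (results.filter (fun r => r.1 == -1)).map (fun r => String.ofList [r.2])

-- ===== PORT B =====
def pvNextB (player : Option String) : Option String :=
  if player = some "1" then some "2"
  else if player = some "2" then some "1"
  else none

def pvScoreB (player : Option String) : Int :=
  if player = some "1" then -1
  else if player = some "2" then 1
  else 0

def pvFirsts (suffixes : List (List Char)) : List Char :=
  PySem.List.sorted (PySem.Set.ofList (suffixes.filterMap List.head?)) (fun c => c) false

def pvBucket (suffixes : List (List Char)) (c : Char) : List (List Char) :=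
  suffixes.filterMap (fun s => match s with
    | [] => none
    | h :: t => if h = c then some t else none)

-- fuel only makes the recursion total in Lean; min_move_alt passes more than the depth used
def pvValue : Nat → List (List Char) → Option String → Bool → Int
  | 0, _, _, _ => 0
  | fuel + 1, suffixes, player, maximize =>
    if [] ∈ suffixes then pvScoreB player
    else
      let vals := (pvFirsts suffixes).map (fun c =>
        pvValue fuel (pvBucket suffixes c) (pvNextB player) (!maximize))
      if maximize then (PySem.List.max? vals (fun v => v)).getD 0
      else (PySem.List.min? vals (fun v => v)).getD 0

def pvSufs (b : List Char) (dict : List (List Char)) : List (List Char) :=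
  dict.filterMap (fun w =>
    if PySem.Chars.startswith w b then some (w.drop b.length) else none)

def min_move_alt (board : String) (dictionary : List String) (player : String) : List String :=
  let b := board.toList
  let suffixes := pvSufs b (dictionary.map String.toList)
  if [] ∈ suffixes then []
  else
    let fuel := suffixes.foldl (fun a s => a + s.length) 0 + 1
    (pvFirsts suffixes).filterMap (fun c =>
      if pvValue fuel (pvBucket suffixes c) (pvNextB (some player)) true = -1
      then some (String.ofList [c]) else none)

-- ===== PRECONDITION & SPEC =====
-- Pre_ excludes boards already in the dictionary (A returns an int score there, not a list)
-- and dictionaries in which a word extending the board continues with a character outside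
-- 'a'..'z' (A's alphabet-only move generation then recurses forever or ignores the word).
def Pre_min_move (board : String) (dictionary : List String) (player : String) : Prop :=
  board ∉ dictionary ∧
  ∀ w ∈ dictionary, board.toList <+: w.toList →
    (w.toList.drop board.toList.length).all
      (fun c => "abcdefghijklmnopqrstuvwxyz".toList.contains c) = true

instance (board : String) (dictionary : List String) (player : String) :
    Decidable (Pre_min_move board dictionary player) := by unfold Pre_min_move; infer_instance

def pvWitness_min_move : String × List String × String := ("", ["ab", "b"], "1")

def Spec_min_move (board : String) (dictionary : List String) (player : String) (out : List String) : Prop := out = min_move_alt board dictionary player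
instance (board : String) (dictionary : List String) (player : String) (out : List String) : Decidable (Spec_min_move board dictionary player out) := by unfold Spec_min_move; infer_instance

-- ===== CLAIM (what is proved, stated in full; the proofs are below) =====
def Claim_equal_min_move : Prop := ∀ (board : String) (dictionary : List String) (player : String), Dom_min_move board dictionary player → Pre_min_move board dictionary player → Spec_min_move board dictionary player (min_move board dictionary player)

-- ===== LEMMAS AND PROOFS =====

lemma pvBucket_mem {sufs : List (List Char)} {c : Char} {t : List Char} :
    t ∈ pvBucket sufs c ↔ (c :: t) ∈ sufs := by
  unfold pvBucket
  rw [List.mem_filterMap]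
  constructor
  · rintro ⟨s, hs, h⟩
    match s with
    | [] => simp at h
    | h' :: t' =>
      simp only at h
      split at h
      · next heq => cases h; subst heq; exact hs
      · simp at h
  · intro h
    exact ⟨c :: t, h, by simp⟩

lemma pvFirsts_mem {sufs : List (List Char)} {c : Char} :
    c ∈ pvFirsts sufs ↔ ∃ s ∈ sufs, s.head? = some c := by
  unfold pvFirsts
  rw [PySem.List.mem_sorted, PySem.Set.mem_ofList, List.mem_filterMap]

lemma pvND_mem (p : List Char) (Sa : List (List Char)) (x : List Char) :
    (p ++ x) ∈ (pvNextPossibleBoards p Sa).2 ↔ (p ++ x) ∈ Sa := by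
  unfold pvNextPossibleBoards
  rw [PySem.Set.mem_ofList, List.mem_filter]
  simp [PySem.Chars.startswith_iff, List.prefix_append]

lemma pvMoves_eq {p : List Char} {Sa sufs : List (List Char)}
    (hmem : ∀ s, (p ++ s) ∈ Sa ↔ s ∈ sufs)
    (hlow : ∀ s ∈ sufs, ∀ c ∈ s, c ∈ pvAlphabet) :
    (pvNextPossibleBoards p Sa).1 = (pvFirsts sufs).map (fun c => (p ++ [c], c)) := by
  have hK : ∀ c : Char, (∃ s ∈ sufs, s.head? = some c) ↔
      (Sa.any (fun d => PySem.Chars.startswith d (p ++ [c])) = true) := by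
    intro c
    rw [List.any_eq_true]
    constructor
    · rintro ⟨s, hs, hh⟩
      match s with
      | [] => simp at hh
      | c' :: t =>
        simp only [List.head?_cons, Option.some.injEq] at hh
        subst hh
        refine ⟨p ++ c' :: t, (hmem _).mpr hs, ?_⟩
        rw [PySem.Chars.startswith_iff]
        exact ⟨t, by simp⟩
    · rintro ⟨d, hd, hsw⟩
      rw [PySem.Chars.startswith_iff] at hsw
      obtain ⟨t, rfl⟩ := hsw
      have : (c :: t) ∈ sufs := (hmem (c :: t)).mp (by simpa using hd)
      exact ⟨c :: t, this, rfl⟩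
  have hfirsts : pvFirsts sufs =
      pvAlphabet.filter (fun c => Sa.any (fun d => PySem.Chars.startswith d (p ++ [c]))) := by
    unfold pvFirsts
    apply PySem.List.sorted_eq_of_perm_of_pairwise_lt
    · apply (List.perm_ext_iff_of_nodup (List.Nodup.filter _ (by decide)) (PySem.Set.nodup_ofList _)).mpr
      intro c
      rw [List.mem_filter, PySem.Set.mem_ofList, List.mem_filterMap]
      constructor
      · rintro ⟨-, h⟩
        exact (hK c).mpr h
      · intro h
        refine ⟨?_, (hK c).mp h⟩
        obtain ⟨s, hs, hh⟩ := h
        match s with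
        | [] => simp at hh
        | c' :: t =>
          simp only [List.head?_cons, Option.some.injEq] at hh
          subst hh
          exact hlow _ hs _ (by simp)
    · exact List.Pairwise.filter _ (by decide)
  unfold pvNextPossibleBoards
  simp only [hfirsts]
  induction pvAlphabet with
  | nil => rfl
  | cons a l ih =>
    rw [List.filterMap_cons, List.filter_cons]
    by_cases h : (Sa.any fun d => PySem.Chars.startswith d (p ++ [a])) = true
    · simp only [if_pos h]
      rw [List.map_cons, ih]
    · simp only [if_neg h]
      exact ih

lemma pvTerminal_max (fa fb : Nat) (p : List Char) (Sa sufs : List (List Char)) (pl : Option String)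
    (hmem : ∀ s, (p ++ s) ∈ Sa ↔ s ∈ sufs) (hin : ([] : List Char) ∈ sufs) :
    pvMaxStep (fa + 1) p Sa pl = pvValue (fb + 1) sufs pl true := by
  have hp : p ∈ Sa := by have := (hmem []).mpr hin; simpa using this
  simp [pvMaxStep, pvValue, pvGameIsOver, pvScoreBoard, pvScoreB, hp, hin]

lemma pvTerminal_min (fa fb : Nat) (p : List Char) (Sa sufs : List (List Char)) (pl : Option String)
    (hmem : ∀ s, (p ++ s) ∈ Sa ↔ s ∈ sufs) (hin : ([] : List Char) ∈ sufs) :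
    pvMinStep (fa + 1) p Sa pl = pvValue (fb + 1) sufs pl false := by
  have hp : p ∈ Sa := by have := (hmem []).mpr hin; simpa using this
  simp [pvMinStep, pvValue, pvGameIsOver, pvScoreBoard, pvScoreB, hp, hin]

lemma pvStep_eq : ∀ (n fa fb : Nat) (p : List Char) (Sa sufs : List (List Char)) (pl : Option String),
    n < fa → n < fb →
    (∀ s, (p ++ s) ∈ Sa ↔ s ∈ sufs) →
    (∀ s ∈ sufs, ∀ c ∈ s, c ∈ pvAlphabet) →
    sufs ≠ [] →
    (∀ s ∈ sufs, s.length ≤ n) →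
    pvMaxStep fa p Sa pl = pvValue fb sufs pl true ∧
    pvMinStep fa p Sa pl = pvValue fb sufs pl false := by
  intro n
  induction n with
  | zero =>
    intro fa fb p Sa sufs pl hfa hfb hmem hlow hne hlen
    obtain ⟨fa', rfl⟩ : ∃ k, fa = k + 1 := ⟨fa - 1, by omega⟩
    obtain ⟨fb', rfl⟩ : ∃ k, fb = k + 1 := ⟨fb - 1, by omega⟩
    have hin : ([] : List Char) ∈ sufs := by
      obtain ⟨s, hs⟩ := List.exists_mem_of_ne_nil sufs hne
      have h1 := hlen s hs
      have h2 : s = [] := List.eq_nil_of_length_eq_zero (by omega)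
      rwa [h2] at hs
    exact ⟨pvTerminal_max _ _ _ _ _ _ hmem hin, pvTerminal_min _ _ _ _ _ _ hmem hin⟩
  | succ m ih =>
    intro fa fb p Sa sufs pl hfa hfb hmem hlow hne hlen
    obtain ⟨fa', rfl⟩ : ∃ k, fa = k + 1 := ⟨fa - 1, by omega⟩
    obtain ⟨fb', rfl⟩ : ∃ k, fb = k + 1 := ⟨fb - 1, by omega⟩
    by_cases hin : ([] : List Char) ∈ sufs
    · exact ⟨pvTerminal_max _ _ _ _ _ _ hmem hin, pvTerminal_min _ _ _ _ _ _ hmem hin⟩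
    · have hpS : p ∉ Sa := fun h => hin ((hmem []).mp (by simpa using h))
      have hmoves := pvMoves_eq hmem hlow
      have hfne : pvFirsts sufs ≠ [] := by
        obtain ⟨s, hs⟩ := List.exists_mem_of_ne_nil sufs hne
        match s, hs with
        | [], hs => exact absurd hs hin
        | c :: t, hs =>
          intro hf
          have hcf : c ∈ pvFirsts sufs := pvFirsts_mem.mpr ⟨c :: t, hs, rfl⟩
          rw [hf] at hcf
          simp at hcf
      have hchild : ∀ c ∈ pvFirsts sufs,
          pvMaxStep fa' (p ++ [c]) (pvNextPossibleBoards p Sa).2 (pvSwitchPlayer pl)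
            = pvValue fb' (pvBucket sufs c) (pvNextB pl) true ∧
          pvMinStep fa' (p ++ [c]) (pvNextPossibleBoards p Sa).2 (pvSwitchPlayer pl)
            = pvValue fb' (pvBucket sufs c) (pvNextB pl) false := by
        intro c hc
        have hsw : pvSwitchPlayer pl = pvNextB pl := rfl
        rw [hsw]
        apply ih fa' fb' (p ++ [c]) _ (pvBucket sufs c) (pvNextB pl) (by omega) (by omega)
        · intro t
          rw [List.append_assoc]
          rw [pvND_mem p Sa ([c] ++ t)]
          rw [show ([c] ++ t : List Char) = c :: t from rfl]
          rw [hmem (c :: t)]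
          exact Iff.symm pvBucket_mem
        · intro t ht ch hch
          have h1 : (c :: t) ∈ sufs := pvBucket_mem.mp ht
          exact hlow _ h1 ch (by simp [hch])
        · obtain ⟨s, hs, hh⟩ := pvFirsts_mem.mp hc
          match s, hs, hh with
          | c' :: t, hs, hh =>
            simp only [List.head?_cons, Option.some.injEq] at hh
            subst hh
            intro hb
            have hbm := pvBucket_mem.mpr hs
            rw [hb] at hbm
            simp at hbm
        · intro t ht
          have h1 : (c :: t) ∈ sufs := pvBucket_mem.mp ht
          have h2 := hlen _ h1
          simp only [List.length_cons] at h2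
          omega
      have hmapne : (pvFirsts sufs).map (fun c => (p ++ [c], c)) ≠ [] := by
        simpa using hfne
      constructor
      · rw [pvMaxStep]
        rw [if_neg (by simp [pvGameIsOver, hpS])]
        simp only [hmoves, if_neg hmapne, List.map_map]
        rw [pvValue]
        rw [if_neg hin]
        congr 2
        apply List.map_congr_left
        intro c hc
        simpa using (hchild c hc).2
      · rw [pvMinStep]
        rw [if_neg (by simp [pvGameIsOver, hpS])]
        simp only [hmoves, if_neg hmapne, List.map_map]
        rw [pvValue]
        rw [if_neg hin]
        congr 2
        apply List.map_congr_left
        intro c hc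
        simpa using (hchild c hc).1

lemma pvSufs_mem (b : List Char) (dict : List (List Char)) (s : List Char) :
    s ∈ pvSufs b dict ↔ (b ++ s) ∈ dict := by
  unfold pvSufs
  rw [List.mem_filterMap]
  constructor
  · rintro ⟨w, hw, h⟩
    split at h
    · next hsw =>
      rw [PySem.Chars.startswith_iff] at hsw
      obtain ⟨t, rfl⟩ := hsw
      rw [List.drop_left] at h
      cases h
      exact hw
    · simp at h
  · intro h
    refine ⟨b ++ s, h, ?_⟩
    rw [if_pos ((PySem.Chars.startswith_iff _ _).mpr ⟨s, rfl⟩)]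
    rw [List.drop_left]

lemma pvFoldl_len_acc (l : List (List Char)) (acc : Nat) :
    l.foldl (fun a x => a + x.length) acc = acc + (l.map List.length).sum := by
  induction l generalizing acc with
  | nil => simp
  | cons x t ih => simp [ih, Nat.add_assoc]

lemma pvLen_le_sum {l : List (List Char)} {s : List Char} (h : s ∈ l) :
    s.length ≤ l.foldl (fun a x => a + x.length) 0 := by
  rw [pvFoldl_len_acc]
  simpa using List.le_sum_of_mem (List.mem_map_of_mem h)

lemma pvSufs_sum_le (b : List Char) (dict : List (List Char)) :
    (pvSufs b dict).foldl (fun a x => a + x.length) 0 ≤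
      dict.foldl (fun a x => a + x.length) 0 := by
  rw [pvFoldl_len_acc, pvFoldl_len_acc]
  simp only [Nat.zero_add]
  unfold pvSufs
  induction dict with
  | nil => simp
  | cons w t ih =>
    rw [List.filterMap_cons]
    split
    · simp only [List.map_cons, List.sum_cons]
      omega
    · next s' hs' =>
      split at hs'
      · cases hs'
        simp only [List.map_cons, List.sum_cons]
        have : (w.drop b.length).length ≤ w.length := by
          simp [List.length_drop]
        omega
      · simp at hs'

lemma pvOut_eq (l : List Char) (f g : Char → Int) (h : ∀ c ∈ l, f c = g c) :
    ((l.map (fun c => (f c, c))).filter (fun r => r.1 == -1)).map (fun r => String.ofList [r.2])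
      = l.filterMap (fun c => if g c = -1 then some (String.ofList [c]) else none) := by
  induction l with
  | nil => rfl
  | cons a t ih =>
    have ha := h a (by simp)
    have ht := ih (fun c hc => h c (by simp [hc]))
    rw [List.map_cons, List.filter_cons, List.filterMap_cons]
    by_cases hv : g a = -1
    · rw [if_pos hv]
      have hb : ((f a, a).1 == -1) = true := by simp [ha, hv]
      simp [hb, ht]
    · rw [if_neg hv]
      have hb : ((f a, a).1 == -1) = false := by simp [ha, hv]
      simp [hb, ht]

-- ===== VERDICT (by name: the statement is the Claim_ definition above) =====
theorem min_move_spec : Claim_equal_min_move := by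
  unfold Claim_equal_min_move
  intro board dictionary player hdom hpre
  unfold Spec_min_move
  obtain ⟨hnb, hlowpre⟩ := hpre
  unfold min_move min_move_alt
  simp only []
  have hbd : board.toList ∉ dictionary.map String.toList := by
    intro h
    obtain ⟨w, hw, hweq⟩ := List.mem_map.mp h
    exact hnb (by rwa [String.toList_inj.mp hweq] at hw)
  have hmem : ∀ s, (board.toList ++ s) ∈ dictionary.map String.toList ↔
      s ∈ pvSufs board.toList (dictionary.map String.toList) :=
    fun s => (pvSufs_mem _ _ s).symm
  have hlow : ∀ s ∈ pvSufs board.toList (dictionary.map String.toList),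
      ∀ c ∈ s, c ∈ pvAlphabet := by
    intro s hs c hc
    unfold pvSufs at hs
    obtain ⟨w, hw, h⟩ := List.mem_filterMap.mp hs
    obtain ⟨w0, hw0, rfl⟩ := List.mem_map.mp hw
    split at h
    · next hsw =>
      cases h
      unfold pvAlphabet
      exact List.contains_iff_mem.mp
        (List.all_eq_true.mp (hlowpre w0 hw0 ((PySem.Chars.startswith_iff _ _).mp hsw)) c hc)
    · simp at h
  have hinsufs : ([] : List Char) ∉ pvSufs board.toList (dictionary.map String.toList) := by
    intro h
    exact hbd (by simpa using (hmem []).mpr h)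
  rw [if_neg (by simp [pvGameIsOver, hbd]), if_neg hinsufs]
  rw [pvMoves_eq hmem hlow, List.map_map]
  rw [show ((fun nb => (pvMaxStep (List.foldl (fun a w => a + w.length) 0 (dictionary.map String.toList) + 2) nb.1
        (pvNextPossibleBoards board.toList (dictionary.map String.toList)).2
        (pvSwitchPlayer (some player)), nb.2)) ∘ (fun c => (board.toList ++ [c], c)))
      = (fun c => (pvMaxStep (List.foldl (fun a w => a + w.length) 0 (dictionary.map String.toList) + 2) (board.toList ++ [c])
        (pvNextPossibleBoards board.toList (dictionary.map String.toList)).2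
        (pvSwitchPlayer (some player)), c)) from rfl]
  apply pvOut_eq
  intro c hc
  have hsw : pvSwitchPlayer (some player) = pvNextB (some player) := rfl
  rw [hsw]
  apply (pvStep_eq (List.foldl (fun a s => a + s.length) 0 (pvSufs board.toList (dictionary.map String.toList)))
      _ _ (board.toList ++ [c]) _ (pvBucket (pvSufs board.toList (dictionary.map String.toList)) c)
      (pvNextB (some player)) ?_ ?_ ?_ ?_ ?_ ?_).1
  · have := pvSufs_sum_le board.toList (dictionary.map String.toList)
    omega
  · omega
  · intro t
    rw [List.append_assoc]
    rw [pvND_mem board.toList (dictionary.map String.toList) ([c] ++ t)]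
    rw [show ([c] ++ t : List Char) = c :: t from rfl]
    rw [hmem (c :: t)]
    exact Iff.symm pvBucket_mem
  · intro t ht ch hch
    have h1 : (c :: t) ∈ pvSufs board.toList (dictionary.map String.toList) := pvBucket_mem.mp ht
    exact hlow _ h1 ch (by simp [hch])
  · obtain ⟨s, hs, hh⟩ := pvFirsts_mem.mp hc
    match s, hs, hh with
    | c' :: t, hs, hh =>
      simp only [List.head?_cons, Option.some.injEq] at hh
      subst hh
      intro hb
      have hbm := pvBucket_mem.mpr hs
      rw [hb] at hbm
      simp at hbm
  · intro t ht
    have h1 : (c :: t) ∈ pvSufs board.toList (dictionary.map String.toList) := pvBucket_mem.mp ht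
    have h2 := pvLen_le_sum h1
    simp only [List.length_cons] at h2
    omega
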